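-- pv_equiv track=rewrite | github.com/drkplaya777/bctci | Two Pointers/prefix_suffix_swap.py | swap_prefix_and_suffix
-- ===== SOURCE A (Python) =====
-- def swap_prefix_and_suffix(arr):
--     left, right = 0, len(arr) - 1
--     suffix = int(2 * len(arr) / 3)
--
--     # reverse entire array
--     while left < right:
--         arr[left], arr[right] = arr[right], arr[left]
--         left += 1
--         right -= 1
--
--     # reverse suffix
--     left = 0
--     right = suffix - 1
--     while left < right:
--         arr[left], arr[right] = arr[right], arr[left]
--         left += 1
--         right -= 1
--
--     # reverse prefix
--     left = suffix
--     right = len(arr) - 1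
--     while left < right:
--         arr[left], arr[right] = arr[right], arr[left]
--         left += 1
--         right -= 1
--
--     return arr
-- ===== SOURCE B (Python) =====
-- def swap_prefix_and_suffix(arr):
--     # Same split point as A; rotate by slice concatenation, written back in place.
--     k = len(arr) - int(2 * len(arr) / 3)
--     arr[:] = arr[k:] + arr[:k]
--     return arr
-- ===== Notes on version B (the rewrite author's own statement) =====
-- stated objective: simpler
-- what changed: Replaces A's three two-pointer reversal loops (reverse whole array, then reverse each of the two segments) with a single in-place rotation built by slice concatenation arr[:] = arr[k:] + arr[:k] with k = len(arr) - int(2*len(arr)/3). (constant-factor: C-level slice copies replace per-element Python swap iterations)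
import Mathlib
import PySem

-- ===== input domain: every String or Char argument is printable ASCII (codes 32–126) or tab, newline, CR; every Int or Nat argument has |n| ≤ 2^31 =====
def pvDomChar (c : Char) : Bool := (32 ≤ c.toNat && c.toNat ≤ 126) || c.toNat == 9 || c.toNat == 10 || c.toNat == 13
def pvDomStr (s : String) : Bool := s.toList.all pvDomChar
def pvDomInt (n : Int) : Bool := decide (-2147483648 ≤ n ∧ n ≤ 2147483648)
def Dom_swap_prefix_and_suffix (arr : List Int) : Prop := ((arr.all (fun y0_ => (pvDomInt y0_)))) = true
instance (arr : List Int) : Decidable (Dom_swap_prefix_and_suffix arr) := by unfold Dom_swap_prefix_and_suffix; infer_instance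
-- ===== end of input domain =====

-- B replaces A's three two-pointer reversal loops with one slice-concatenation rotation (objective: simpler).
-- Both Pythons mutate arr in place and return it; the equivalence proved here is about the returned value.
-- 'int(2*len(arr)/3)' (float division) is ported as floor division, which is exact for every list length
-- reachable here (the float quotient is exact below 2^52).

-- ===== PORT A =====
-- one two-pointer 'while left < right' swap loop of A (all three loops of A share this shape/state)
def pvSwapLoop (arr : List Int) (left right : Int) : List Int :=
  if _h : left < right then
    let a := PySem.List.pyGetD arr left 0
    let b := PySem.List.pyGetD arr right 0
    pvSwapLoop (PySem.List.pySetD (PySem.List.pySetD arr left b) right a) (left + 1) (right - 1)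
  else arr
termination_by (right - left).toNat
decreasing_by omega

def swap_prefix_and_suffix (arr : List Int) : List Int :=
  let n : Int := arr.length
  let suffix := PySem.Int.floordiv (2 * n) 3
  let arr1 := pvSwapLoop arr 0 (n - 1)          -- reverse entire array
  let arr2 := pvSwapLoop arr1 0 (suffix - 1)    -- reverse suffix
  let arr3 := pvSwapLoop arr2 suffix (n - 1)    -- reverse prefix
  arr3

-- ===== PORT B =====
def swap_prefix_and_suffix_alt (arr : List Int) : List Int :=
  let k : Int := (arr.length : Int) - PySem.Int.floordiv (2 * (arr.length : Int)) 3
  PySem.List.slice arr (some k) none ++ PySem.List.slice arr none (some k)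

-- ===== PRECONDITION & SPEC =====
def Spec_swap_prefix_and_suffix (arr : List Int) (out : List Int) : Prop := out = swap_prefix_and_suffix_alt arr
instance (arr : List Int) (out : List Int) : Decidable (Spec_swap_prefix_and_suffix arr out) := by unfold Spec_swap_prefix_and_suffix; infer_instance

-- ===== CLAIM (what is proved, stated in full; the proofs are below) =====
def Claim_equal_swap_prefix_and_suffix : Prop := ∀ (arr : List Int), Dom_swap_prefix_and_suffix arr → Spec_swap_prefix_and_suffix arr (swap_prefix_and_suffix arr)

-- ===== LEMMAS AND PROOFS =====

theorem pv_set_mid {α : Type} (pre : List α) (x v : α) (rest : List α) :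
    (pre ++ x :: rest).set pre.length v = pre ++ v :: rest := by
  induction pre with
  | nil => simp
  | cons h t ih => simp [ih]

theorem pv_getD_mid (pre : List Int) (x : Int) (rest : List Int) :
    PySem.List.pyGetD (pre ++ x :: rest) (pre.length : Int) 0 = x := by
  simp [PySem.List.pyGetD_natCast, List.getD_eq_getElem?_getD]

-- the two-pointer loop on indices [|pre|, |pre|+|mid|-1] reverses exactly the segment mid
theorem pvSwapLoop_segment : ∀ (m : Nat) (pre mid post : List Int), mid.length = m →
    pvSwapLoop (pre ++ mid ++ post) (pre.length : Int) ((pre.length : Int) + (mid.length : Int) - 1)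
      = pre ++ mid.reverse ++ post := by
  intro m
  induction m using Nat.strong_induction_on with
  | _ m ih =>
    intro pre mid post hlen
    match mid with
    | [] =>
      rw [pvSwapLoop, dif_neg (by simp)]
      simp
    | [x] =>
      rw [pvSwapLoop, dif_neg (by simp)]
      simp
    | a :: b :: rest =>
      obtain ⟨l₂, c, hbc⟩ := (b :: rest).eq_nil_or_concat.resolve_left (by simp)
      rw [List.concat_eq_append] at hbc
      rw [hbc]
      have hl : (a :: (l₂ ++ [c])).length = l₂.length + 2 := by simp
      rw [pvSwapLoop, dif_pos (by rw [hl]; push_cast; omega)]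
      have harr : pre ++ (a :: (l₂ ++ [c])) ++ post = pre ++ a :: (l₂ ++ c :: post) := by
        simp
      simp only [harr]
      rw [pv_getD_mid]
      have hidx : (pre.length : Int) + ((a :: (l₂ ++ [c])).length : Int) - 1
          = (((pre ++ a :: l₂).length : Nat) : Int) := by
        rw [hl]; push_cast; simp; ring
      have hre : pre ++ a :: (l₂ ++ c :: post) = (pre ++ a :: l₂) ++ c :: post := by simp
      rw [hidx, hre, pv_getD_mid]
      -- the two assignments
      simp only [PySem.List.pySetD_natCast]
      rw [show (pre ++ a :: l₂) ++ c :: post = pre ++ a :: (l₂ ++ c :: post) by simp]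
      rw [pv_set_mid]
      rw [show pre ++ c :: (l₂ ++ c :: post) = (pre ++ c :: l₂) ++ c :: post by simp]
      rw [show (pre ++ a :: l₂).length = (pre ++ c :: l₂).length by simp]
      rw [pv_set_mid]
      -- the recursive call
      have hL : ((pre.length : Int) + 1) = (((pre ++ [c]).length : Nat) : Int) := by
        simp
      have hR : (((pre ++ c :: l₂).length : Nat) : Int) - 1
          = (((pre ++ [c]).length : Nat) : Int) + (l₂.length : Int) - 1 := by
        simp; ring
      rw [show (pre ++ c :: l₂) ++ a :: post = (pre ++ [c]) ++ l₂ ++ (a :: post) by simp,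
          hL, hR, ih l₂.length (by
            have h2 : (b :: rest).length = (l₂ ++ [c]).length := by rw [hbc]
            simp at h2 hlen; omega) (pre ++ [c]) l₂ (a :: post) rfl]
      simp
theorem swap_prefix_and_suffix_eq (arr : List Int) :
    swap_prefix_and_suffix arr = swap_prefix_and_suffix_alt arr := by
  unfold swap_prefix_and_suffix swap_prefix_and_suffix_alt
  simp only [PySem.Int.floordiv_eq_ediv_of_pos (by norm_num : (0:Int) < 3)]
  set s : Int := (2 * (arr.length : Int)) / 3 with hs_def
  have hs1 : 0 ≤ s ∧ s ≤ (arr.length : Int) := by omega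
  set t : Nat := s.toNat with ht_def
  have hts : (t : Int) = s := by omega
  have htn : t ≤ arr.length := by omega
  -- loop 1: reverse the entire array
  have h1 : pvSwapLoop arr 0 ((arr.length : Int) - 1) = arr.reverse := by
    have H := pvSwapLoop_segment arr.length [] arr [] rfl
    simpa using H
  -- loop 2: reverse the suffix segment (front part of the reversed array)
  have h2 : pvSwapLoop arr.reverse 0 (s - 1)
      = (arr.reverse.take t).reverse ++ arr.reverse.drop t := by
    have H := pvSwapLoop_segment (arr.reverse.take t).length []
      (arr.reverse.take t) (arr.reverse.drop t) rfl
    simp only [List.nil_append, List.length_nil, Nat.cast_zero, zero_add,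
      List.take_append_drop] at H
    have hlen : (((arr.reverse.take t).length : Nat) : Int) = s := by
      simp [List.length_take]; omega
    rwa [hlen] at H
  -- loop 3: reverse the prefix segment (back part)
  have h3 : pvSwapLoop ((arr.reverse.take t).reverse ++ arr.reverse.drop t) s
        ((arr.length : Int) - 1)
      = (arr.reverse.take t).reverse ++ (arr.reverse.drop t).reverse := by
    have H := pvSwapLoop_segment (arr.reverse.drop t).length
      ((arr.reverse.take t).reverse) (arr.reverse.drop t) [] rfl
    simp only [List.append_nil] at H
    have hA : (((arr.reverse.take t).reverse.length : Nat) : Int) = s := by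
      simp [List.length_take]; omega
    have hB : (((arr.reverse.drop t).length : Nat) : Int) = (arr.length : Int) - s := by
      simp [List.length_drop]; omega
    rw [hA, hB, show s + ((arr.length : Int) - s) - 1 = (arr.length : Int) - 1 by ring] at H
    exact H
  simp only [h1, h2, h3]
  -- both sides are drop (n-t) ++ take (n-t)
  have hk : ((arr.length : Int) - s) = ((arr.length - t : Nat) : Int) := by omega
  rw [hk, PySem.List.slice_from_natCast, PySem.List.slice_to_natCast]
  congr 1
  · rw [List.reverse_take]; simp
  · rw [List.reverse_drop]; simp

-- ===== VERDICT (by name: the statement is the Claim_ definition above) =====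
theorem swap_prefix_and_suffix_spec : Claim_equal_swap_prefix_and_suffix := by
  intro arr _
  exact swap_prefix_and_suffix_eq arr
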